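-- pv_equiv track=rewrite | github.com/jloutey-hash/geovac | geovac/n_electron_scope.py | level4_channel_count
-- ===== SOURCE A (Python) =====
-- def level4_channel_count(l_max: int, sigma_only: bool = True,
--                          homonuclear: bool = True) -> int:
--     """Count channels for 2-electron Level 4 solver.
--
--     Channels: (l1, m1, l2, m2) with m1 + m2 = 0, l1+l2 even (homonuclear).
--     """
--     count = 0
--     for l1 in range(l_max + 1):
--         for l2 in range(l_max + 1):
--             if homonuclear and (l1 + l2) % 2 != 0:
--                 continue
--             if sigma_only:
--                 count += 1  # m1 = m2 = 0 only
--             else: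
--                 m_limit = min(l1, l2)
--                 count += 2 * m_limit + 1  # m1 = -m_limit..m_limit
--     return count
-- ===== SOURCE B (Python) =====
-- def level4_channel_count(l_max: int, sigma_only: bool = True,
--                          homonuclear: bool = True) -> int:
--     """Closed-form count of 2-electron Level 4 channels (no loops)."""
--     n = l_max + 1
--     if n <= 0:
--         return 0
--     if sigma_only:
--         return (n * n + n % 2) // 2 if homonuclear else n * n
--     if homonuclear:
--         return n + (n - 1) * n * (n + 1) // 3
--     return n * n + (n - 1) * n * (2 * n - 1) // 3
-- ===== Notes on version B (the rewrite author's own statement) =====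
-- stated objective: faster
-- what changed: Replaces the O(l_max^2) double loop over (l1,l2) by closed-form arithmetic: a parity-split square count for the sigma-only cases and telescoped polynomial sums (n + (n-1)n(n+1)/3, n^2 + (n-1)n(2n-1)/3) for the m-resolved cases.
import Mathlib
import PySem

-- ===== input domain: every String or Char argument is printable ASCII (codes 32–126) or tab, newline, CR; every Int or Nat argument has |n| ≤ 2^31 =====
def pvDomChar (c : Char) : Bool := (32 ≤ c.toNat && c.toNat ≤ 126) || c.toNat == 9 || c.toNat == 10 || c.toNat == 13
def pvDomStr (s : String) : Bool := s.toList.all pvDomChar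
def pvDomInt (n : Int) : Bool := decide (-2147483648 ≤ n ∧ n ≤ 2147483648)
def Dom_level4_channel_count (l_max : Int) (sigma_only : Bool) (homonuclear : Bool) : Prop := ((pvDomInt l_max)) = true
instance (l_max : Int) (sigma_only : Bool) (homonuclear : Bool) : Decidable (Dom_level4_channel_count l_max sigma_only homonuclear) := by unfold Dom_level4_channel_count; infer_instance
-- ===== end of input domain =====

-- B replaces A's O(l_max^2) double loop by closed-form arithmetic (faster, asymptotic).

-- ===== PORT A =====
def level4_channel_count (l_max : Int) (sigma_only : Bool) (homonuclear : Bool) : Int :=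
  (PySem.List.pyRange 0 (l_max + 1) 1).foldl (fun count l1 =>
    (PySem.List.pyRange 0 (l_max + 1) 1).foldl (fun count l2 =>
      if homonuclear && (PySem.Int.mod (l1 + l2) 2 != 0) then count
      else if sigma_only then count + 1
      else count + (2 * min l1 l2 + 1)) count) 0

-- ===== PORT B =====
def level4_channel_count_alt (l_max : Int) (sigma_only : Bool) (homonuclear : Bool) : Int :=
  let n := l_max + 1
  if n ≤ 0 then 0
  else if sigma_only then
    (if homonuclear then PySem.Int.floordiv (n * n + PySem.Int.mod n 2) 2 else n * n)
  else if homonuclear then n + PySem.Int.floordiv ((n - 1) * n * (n + 1)) 3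
  else n * n + PySem.Int.floordiv ((n - 1) * n * (2 * n - 1)) 3

-- ===== PRECONDITION & SPEC =====
def Spec_level4_channel_count (l_max : Int) (sigma_only : Bool) (homonuclear : Bool) (out : Int) : Prop := out = level4_channel_count_alt l_max sigma_only homonuclear
instance (l_max : Int) (sigma_only : Bool) (homonuclear : Bool) (out : Int) : Decidable (Spec_level4_channel_count l_max sigma_only homonuclear out) := by unfold Spec_level4_channel_count; infer_instance

-- ===== CLAIM (what is proved, stated in full; the proofs are below) =====
def Claim_equal_level4_channel_count : Prop := ∀ (l_max : Int) (sigma_only : Bool) (homonuclear : Bool), Dom_level4_channel_count l_max sigma_only homonuclear → Spec_level4_channel_count l_max sigma_only homonuclear (level4_channel_count l_max sigma_only homonuclear)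

-- ===== LEMMAS AND PROOFS =====

-- the per-pair contribution of A's inner loop body
def pvTerm (sg hm : Bool) (x y : Int) : Int :=
  if hm && (PySem.Int.mod (x + y) 2 != 0) then 0 else if sg then 1 else 2 * min x y + 1

-- row sum with min already resolved to the inner index
def pvRow (sg hm : Bool) (x : Int) (N : Nat) : Int :=
  ((List.range N).map (fun (j : Nat) => if hm && (PySem.Int.mod (x + (j : Int)) 2 != 0) then 0
    else if sg then 1 else 2 * (j : Int) + 1)).sum

-- the full grid sum A computes, at Nat bound N = l_max + 1
def pvG (sg hm : Bool) (N : Nat) : Int :=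
  ((List.range N).map (fun (i : Nat) =>
    ((List.range N).map (fun (j : Nat) => pvTerm sg hm (i : Int) (j : Int))).sum)).sum

lemma pvmod2 (y : Int) : PySem.Int.mod y 2 = y % 2 :=
  PySem.Int.mod_eq_emod_of_pos (by norm_num)

lemma pvfoldl_add {α : Type} (l : List α) (g : α → Int) (acc : Int) :
    l.foldl (fun c x => c + g x) acc = acc + (l.map g).sum := by
  induction l generalizing acc with
  | nil => simp
  | cons a t ih => rw [List.foldl_cons, ih]; simp only [List.map_cons, List.sum_cons]; ring

lemma pvsum_map_add {α : Type} (l : List α) (f g : α → Int) :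
    (l.map (fun x => f x + g x)).sum = (l.map f).sum + (l.map g).sum := by
  induction l with
  | nil => simp
  | cons a t ih => simp only [List.map_cons, List.sum_cons, ih]; ring

lemma pvTerm_comm (sg hm : Bool) (x y : Int) : pvTerm sg hm x y = pvTerm sg hm y x := by
  simp [pvTerm, add_comm, min_comm]

lemma pvterm_eq_row (sg hm : Bool) (x : Int) : ∀ N : Nat, (N : Int) ≤ x + 1 →
    ((List.range N).map (fun (j : Nat) => pvTerm sg hm x (j : Int))).sum = pvRow sg hm x N := by
  intro N
  induction N with
  | zero => intro _; simp [pvRow]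
  | succ n ih =>
    intro hx
    have hn1 : ((n : Int)) ≤ x := by push_cast at hx; omega
    rw [List.range_succ]
    unfold pvRow
    rw [List.range_succ]
    simp only [List.map_append, List.sum_append, List.map_cons, List.map_nil, List.sum_cons,
      List.sum_nil]
    rw [show ((List.range n).map (fun (j : Nat) => pvTerm sg hm x (j : Int))).sum = pvRow sg hm x n from
      ih (by omega)]
    unfold pvRow
    rw [show pvTerm sg hm x (n : Int) = (if hm && (PySem.Int.mod (x + (n : Int)) 2 != 0) then 0
      else if sg then 1 else 2 * (n : Int) + 1) from by simp [pvTerm, min_eq_right hn1]]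

lemma pvRow_succ (sg hm : Bool) (x : Int) (N : Nat) :
    pvRow sg hm x (N + 1) = pvRow sg hm x N +
      (if hm && (PySem.Int.mod (x + (N : Int)) 2 != 0) then 0 else if sg then 1 else 2 * (N : Int) + 1) := by
  unfold pvRow
  rw [List.range_succ]
  simp

lemma pvG_succ (sg hm : Bool) (N : Nat) :
    pvG sg hm (N + 1) = pvG sg hm N + 2 * pvRow sg hm (N : Int) N + pvTerm sg hm (N : Int) (N : Int) := by
  have hx : (N : Int) ≤ (N : Int) + 1 := by omega
  have hcol : (fun i : Nat => pvTerm sg hm (i : Int) (N : Int)) =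
      fun i : Nat => pvTerm sg hm (N : Int) (i : Int) := funext fun i => pvTerm_comm _ _ _ _
  unfold pvG
  rw [List.range_succ]
  simp only [List.map_append, List.sum_append, List.map_cons, List.map_nil, List.sum_cons,
    List.sum_nil, add_zero]
  rw [pvsum_map_add (List.range N) (fun (i : Nat) => ((List.range N).map (fun (j : Nat) => pvTerm sg hm (i : Int) (j : Int))).sum) (fun (i : Nat) => pvTerm sg hm (i : Int) (N : Int))]
  rw [hcol, pvterm_eq_row sg hm (N : Int) N hx]
  ring

lemma pvRow_tf (x : Int) (N : Nat) : pvRow true false x N = (N : Int) := by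
  induction N with
  | zero => simp [pvRow]
  | succ n ih => rw [pvRow_succ, ih]; simp

lemma pvRow_ff (x : Int) (N : Nat) : pvRow false false x N = (N : Int) * (N : Int) := by
  induction N with
  | zero => simp [pvRow]
  | succ n ih => rw [pvRow_succ, ih]; simp; ring

lemma pvRow_tt (x : Int) (N : Nat) :
    2 * pvRow true true x N = (N : Int) + (1 - 2 * (x % 2)) * ((N : Int) % 2) := by
  induction N with
  | zero => simp [pvRow]
  | succ n ih =>
    rw [pvRow_succ]
    simp only [Bool.true_and, pvmod2]
    have h1 : ((n : Int) + 1) % 2 = 1 - (n : Int) % 2 := by omega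
    rcases Int.emod_two_eq x with hx | hx <;>
      rcases Int.emod_two_eq ((n : Int)) with hn | hn <;>
      by_cases hc : (x + (n : Int)) % 2 = 0 <;>
      first
        | (exfalso; omega)
        | (simp only [hc, bne_iff_ne, ne_eq, not_true_eq_false, not_false_eq_true, if_true,
            if_false]
           push_cast
           simp only [h1, hx, hn] at ih ⊢
           linear_combination ih)

lemma pvRow_ft (x : Int) (N : Nat) :
    2 * pvRow false true x N =
      if x % 2 = 0 then ((N : Int) + (N : Int) % 2) ^ 2 - ((N : Int) + (N : Int) % 2)
      else ((N : Int) - (N : Int) % 2) ^ 2 + ((N : Int) - (N : Int) % 2) := by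
  induction N with
  | zero => simp [pvRow]
  | succ n ih =>
    rw [pvRow_succ]
    simp only [Bool.true_and, pvmod2]
    have h1 : ((n : Int) + 1) % 2 = 1 - (n : Int) % 2 := by omega
    rcases Int.emod_two_eq x with hx | hx <;>
      rcases Int.emod_two_eq ((n : Int)) with hn | hn <;>
      by_cases hc : (x + (n : Int)) % 2 = 0 <;>
      first
        | (exfalso; omega)
        | (simp only [hc, bne_iff_ne, ne_eq, not_true_eq_false, not_false_eq_true, if_true,
            if_false]
           push_cast
           simp only [h1, hx, hn] at ih ⊢
           norm_num at ih ⊢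
           linear_combination ih)

lemma pvG_tf (N : Nat) : pvG true false N = (N : Int) * (N : Int) := by
  induction N with
  | zero => simp [pvG]
  | succ n ih =>
    rw [pvG_succ, ih, pvRow_tf]
    have hd : pvTerm true false (n : Int) (n : Int) = 1 := by simp [pvTerm]
    rw [hd]; push_cast; ring

lemma pvG_tt (N : Nat) : 2 * pvG true true N = (N : Int) * (N : Int) + (N : Int) % 2 := by
  induction N with
  | zero => simp [pvG]
  | succ n ih =>
    have hd : pvTerm true true (n : Int) (n : Int) = 1 := by
      have h0 : ((n : Int) + (n : Int)) % 2 = 0 := by omega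
      simp [pvTerm, h0]
    have hrow := pvRow_tt (n : Int) n
    rw [pvG_succ, hd]
    have h1 : ((n : Int) + 1) % 2 = 1 - (n : Int) % 2 := by omega
    rcases Int.emod_two_eq ((n : Int)) with hn | hn <;>
      (push_cast
       simp only [h1, hn] at ih hrow ⊢
       linear_combination ih + 2 * hrow)

lemma pvG_ft (N : Nat) :
    3 * pvG false true N = 3 * (N : Int) + ((N : Int) - 1) * (N : Int) * ((N : Int) + 1) := by
  induction N with
  | zero => simp [pvG]
  | succ n ih =>
    have hd : pvTerm false true (n : Int) (n : Int) = 2 * (n : Int) + 1 := by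
      have h0 : ((n : Int) + (n : Int)) % 2 = 0 := by omega
      simp [pvTerm, h0]
    have hrow := pvRow_ft (n : Int) n
    rw [pvG_succ, hd]
    rcases Int.emod_two_eq ((n : Int)) with hn | hn <;>
      (simp only [hn] at hrow
       norm_num at hrow
       push_cast
       linear_combination ih + 3 * hrow)

lemma pvG_ff (N : Nat) :
    3 * pvG false false N = 3 * (N : Int) * (N : Int) + ((N : Int) - 1) * (N : Int) * (2 * (N : Int) - 1) := by
  induction N with
  | zero => simp [pvG]
  | succ n ih =>
    have hd : pvTerm false false (n : Int) (n : Int) = 2 * (n : Int) + 1 := by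
      simp [pvTerm]
    have hrow := pvRow_ff (n : Int) n
    rw [pvG_succ, hd, hrow]
    push_cast
    linear_combination ih

lemma pvinner (sg hm : Bool) (x : Int) (l : List Int) (acc : Int) :
    l.foldl (fun count l2 => if hm && (PySem.Int.mod (x + l2) 2 != 0) then count
      else if sg then count + 1 else count + (2 * min x l2 + 1)) acc
      = acc + (l.map (pvTerm sg hm x)).sum := by
  induction l generalizing acc with
  | nil => simp
  | cons a t ih =>
    rw [List.foldl_cons, ih]
    simp only [pvTerm, List.map_cons, List.sum_cons]
    split_ifs <;> ring

lemma pvA_eq_G (sg hm : Bool) (N : Nat) (l_max : Int) (hl : l_max + 1 = (N : Int)) :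
    level4_channel_count l_max sg hm = pvG sg hm N := by
  unfold level4_channel_count
  rw [hl, PySem.List.pyRange_one]
  simp only [sub_zero, Int.toNat_natCast, zero_add]
  simp only [pvinner]
  rw [pvfoldl_add]
  simp only [zero_add, List.map_map, Function.comp_def, pvG]

lemma pvB_eq_G (sg hm : Bool) (N : Nat) (l_max : Int) (hl : l_max + 1 = (N : Int))
    (hpos : ¬ l_max + 1 ≤ 0) : level4_channel_count_alt l_max sg hm = pvG sg hm N := by
  have hdiv2 : ∀ y : Int, PySem.Int.floordiv y 2 = y / 2 := fun y =>
    PySem.Int.floordiv_eq_ediv_of_pos (by norm_num)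
  have hdiv3 : ∀ y : Int, PySem.Int.floordiv y 3 = y / 3 := fun y =>
    PySem.Int.floordiv_eq_ediv_of_pos (by norm_num)
  unfold level4_channel_count_alt
  simp only [hl, if_neg (hl ▸ hpos)]
  cases sg <;> cases hm
  · -- sg = false, hm = false
    have h3 := pvG_ff N
    have hx : ((N : Int) - 1) * (N : Int) * (2 * (N : Int) - 1)
        = 3 * (pvG false false N - (N : Int) * (N : Int)) := by linarith
    simp only [Bool.false_eq_true, if_false]
    rw [hdiv3, hx, Int.mul_ediv_cancel_left _ (by norm_num : (3:Int) ≠ 0)]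
    ring
  · -- sg = false, hm = true
    have h3 := pvG_ft N
    have hx : ((N : Int) - 1) * (N : Int) * ((N : Int) + 1)
        = 3 * (pvG false true N - (N : Int)) := by linarith
    simp only [Bool.false_eq_true, if_false, if_true]
    rw [hdiv3, hx, Int.mul_ediv_cancel_left _ (by norm_num : (3:Int) ≠ 0)]
    ring
  · -- sg = true, hm = false
    have h1 := pvG_tf N
    simp only [Bool.false_eq_true, if_true, if_false]
    omega
  · -- sg = true, hm = true
    have h2 := pvG_tt N
    simp only [if_true]
    rw [hdiv2, pvmod2]
    have hx : (N : Int) * (N : Int) + (N : Int) % 2 = 2 * pvG true true N := h2.symm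
    rw [hx, Int.mul_ediv_cancel_left _ (by norm_num : (2:Int) ≠ 0)]

-- ===== VERDICT (by name: the statement is the Claim_ definition above) =====
theorem level4_channel_count_spec : Claim_equal_level4_channel_count := by
  unfold Claim_equal_level4_channel_count
  intro l_max sg hm _
  unfold Spec_level4_channel_count
  by_cases hneg : l_max + 1 ≤ 0
  · unfold level4_channel_count level4_channel_count_alt
    rw [PySem.List.pyRange_one_eq_nil (by omega)]
    simp [hneg]
  · have h0 : (0 : Int) ≤ l_max + 1 := by omega
    have hl : l_max + 1 = (((l_max + 1).toNat : Nat) : Int) := (Int.toNat_of_nonneg h0).symm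
    rw [pvA_eq_G sg hm _ _ hl, pvB_eq_G sg hm _ _ hl hneg]
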